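-- pv_equiv track=rewrite | github.com/arsenijj/AANT | lab8/lab8.py | find_r
-- ===== SOURCE A (Python) =====
-- def gcd(a, b):
--     if a == 0:
--         return b
--     else:
--         return gcd(b % a, a)
--
-- def find_r(n, n_log):
--
--     right = n_log ** 2
--
--     first_value = 2
--
--     while True:
--
--         if (l := gcd(first_value, n)) != 1 and first_value % n:
--             return False, l
--
--         elems = [n % first_value]
--         elem_save = elem = n % first_value
--         order = 1
--
--         while True:
--
--             elem = (elem * elem_save) % first_value
--
--             if elem not in elems:
--                 elems.append(elem)
--                 order += 1
--             else:
--                 break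
--
--         if order > right:
--
--             return True, first_value
--
--         else:
--             first_value += 1
-- ===== SOURCE B (Python) =====
-- def gcd(a, b):
--     if a == 0:
--         return b
--     else:
--         return gcd(b % a, a)
--
-- def find_r(n, n_log):
--     right = n_log ** 2
--     first_value = 2
--     while True:
--         l = gcd(first_value, n)
--         if l != 1 and first_value % n:
--             return False, l
--         base = n % first_value
--         seen = set()
--         x = 1
--         for _ in range(first_value):
--             x = x * base % first_value
--             seen.add(x)
--         if len(seen) > right:
--             return True, first_value
--         first_value += 1
-- ===== Notes on version B (the rewrite author's own statement) =====
-- stated objective: alternative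
-- what changed: The inner multiplicative-order computation no longer grows a list of seen powers and breaks on the first repeated membership test; B iterates x -> x*base % first_value a fixed first_value times, collects the iterates into a set, and takes its cardinality (the orbit of base has at most first_value distinct values, so the count of distinct iterates equals A's steps-until-first-repeat).
import Mathlib
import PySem

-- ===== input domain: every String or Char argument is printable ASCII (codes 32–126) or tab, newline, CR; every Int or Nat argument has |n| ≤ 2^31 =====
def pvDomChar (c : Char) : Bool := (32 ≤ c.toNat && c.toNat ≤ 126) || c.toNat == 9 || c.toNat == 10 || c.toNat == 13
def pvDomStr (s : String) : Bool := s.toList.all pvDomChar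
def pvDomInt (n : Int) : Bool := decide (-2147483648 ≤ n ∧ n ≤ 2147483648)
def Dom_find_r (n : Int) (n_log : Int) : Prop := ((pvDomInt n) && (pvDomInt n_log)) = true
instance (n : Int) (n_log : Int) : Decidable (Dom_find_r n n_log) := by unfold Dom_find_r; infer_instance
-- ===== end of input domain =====

-- B replaces A's grow-a-list-and-break-on-first-repeat inner order computation by a fixed-count
-- iteration collecting the first `first_value` iterates into a set and taking its cardinality.

-- ===== PORT A =====
-- Python's `b % a` recursion descends on |a| (divisor-signed remainder).
theorem pvModNatAbsLt (b a : Int) (h : a ≠ 0) : (PySem.Int.mod b a).natAbs < a.natAbs := by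
  rcases lt_or_gt_of_ne h with hneg | hpos
  · have h1 := PySem.Int.mod_neg_bounds (a := b) (b := a) hneg
    omega
  · have h1 := PySem.Int.mod_nonneg (a := b) (b := a) hpos
    have h2 := PySem.Int.mod_lt (a := b) (b := a) hpos
    omega

-- helper gcd(a, b) from the module, shared verbatim by Source A and Source B
def pyGcd (a b : Int) : Int :=
  if h : a = 0 then b
  else pyGcd (PySem.Int.mod b a) a
termination_by a.natAbs
decreasing_by exact pvModNatAbsLt b a h

-- inner `while True` of A: append until the next power repeats; fuel m.toNat is enough
-- (proved below: the loop stops after at most m steps, all values being residues mod m)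
def pvInnerA (m save : Int) : Nat → List Int → Int → Int → Int
  | 0, _, _, order => order
  | fuel+1, elems, elem, order =>
    let e := PySem.Int.mod (elem * save) m
    if e ∉ elems then pvInnerA m save fuel (elems ++ [e]) e (order + 1)
    else order

-- outer `while True` of A, on fuel (Python diverges where the fuel would run out; Pre_ excludes those inputs)
def pvLoopA (n right : Int) : Nat → Int → Bool × Int
  | 0, _ => (false, 0)
  | fuel+1, fv =>
    let l := pyGcd fv n
    if l ≠ 1 ∧ PySem.Int.mod fv n ≠ 0 then (false, l)
    else
      let base := PySem.Int.mod n fv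
      let order := pvInnerA fv base fv.toNat [base] base 1
      if right < order then (true, fv)
      else pvLoopA n right fuel (fv + 1)

def find_r (n : Int) (n_log : Int) : Bool × Int := pvLoopA n (n_log ^ 2) (2 ^ 63) 2

-- ===== PORT B =====
-- B's `for _ in range(first_value): x = x * base % first_value; seen.add(x)`
def pvLoopB (n right : Int) : Nat → Int → Bool × Int
  | 0, _ => (false, 0)
  | fuel+1, fv =>
    let l := pyGcd fv n
    if l ≠ 1 ∧ PySem.Int.mod fv n ≠ 0 then (false, l)
    else
      let base := PySem.Int.mod n fv
      let seen := ((PySem.List.pyRange 0 fv 1).foldl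
        (fun (st : Int × PySem.Set Int) _ =>
          let x := PySem.Int.mod (st.1 * base) fv
          (x, PySem.Set.add st.2 x)) (1, (PySem.Set.empty : PySem.Set Int))).2
      if right < (seen.length : Int) then (true, fv)
      else pvLoopB n right fuel (fv + 1)

def find_r_alt (n : Int) (n_log : Int) : Bool × Int := pvLoopB n (n_log ^ 2) (2 ^ 63) 2

-- ===== PRECONDITION & SPEC =====
-- Pre_ excludes n = 0 (A raises ZeroDivisionError at `first_value % n`) and n = ±1 with
-- n_log**2 too large (the order never exceeds right, so A's outer while loop never returns).
def Pre_find_r (n : Int) (n_log : Int) : Prop :=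
  n ≠ 0 ∧ (2 ≤ n ∨ n ≤ -2 ∨ (n = 1 ∧ n_log = 0) ∨ (n = -1 ∧ -1 ≤ n_log ∧ n_log ≤ 1))
instance (n : Int) (n_log : Int) : Decidable (Pre_find_r n n_log) := by unfold Pre_find_r; infer_instance

def pvWitness_find_r : Int × Int := (4, 1)

def Spec_find_r (n : Int) (n_log : Int) (out : Bool × Int) : Prop := out = find_r_alt n n_log
instance (n : Int) (n_log : Int) (out : Bool × Int) : Decidable (Spec_find_r n n_log out) := by unfold Spec_find_r; infer_instance

-- ===== CLAIM (what is proved, stated in full; the proofs are below) =====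
def Claim_equal_find_r : Prop := ∀ (n : Int) (n_log : Int), Dom_find_r n n_log → Pre_find_r n n_log → Spec_find_r n n_log (find_r n n_log)

-- ===== LEMMAS AND PROOFS =====

-- the orbit b, b² % m, b³ % m, … both inner loops walk (base = n % first_value)
def pvOrbit (m b : Int) : Nat → Int
  | 0 => b
  | k+1 => (pvOrbit m b k * b).emod m

theorem pvOrbit_bounds (m b : Int) (hm : 0 < m) (hb0 : 0 ≤ b) (hbm : b < m) :
    ∀ k, 0 ≤ pvOrbit m b k ∧ pvOrbit m b k < m := by
  intro k
  induction k with
  | zero => exact ⟨hb0, hbm⟩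
  | succ k _ =>
    exact ⟨Int.emod_nonneg _ (by omega), Int.emod_lt_of_pos _ hm⟩


theorem pvNodupPrefix (m b : Int) (K : Nat)
    (hmin : ∀ i, i < K → pvOrbit m b i ∉ (List.range i).map (pvOrbit m b)) :
    ∀ j, j ≤ K → ((List.range j).map (pvOrbit m b)).Nodup := by
  intro j hj
  induction j with
  | zero => simp
  | succ j ih =>
    rw [List.range_succ, List.map_append]
    refine List.Nodup.append (ih (by omega)) (by simp) ?_
    intro x hx
    simp only [List.map_cons, List.map_nil, List.mem_cons, List.not_mem_nil, or_false]
    intro hEq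
    exact hmin j (by omega) (hEq ▸ hx)

theorem pvKLe (m b : Int) (hm : 0 < m) (hb0 : 0 ≤ b) (hbm : b < m) (K : Nat)
    (hnd : ((List.range K).map (pvOrbit m b)).Nodup) : K ≤ m.toNat := by
  classical
  have hsub : ((List.range K).map (pvOrbit m b)).toFinset ⊆ Finset.Ico (0:ℤ) m := by
    intro x hx
    rw [List.mem_toFinset] at hx
    obtain ⟨k, _, rfl⟩ := List.mem_map.mp hx
    have h := pvOrbit_bounds m b hm hb0 hbm k
    simp only [Finset.mem_Ico]
    omega
  have hcard := Finset.card_le_card hsub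
  rw [List.toFinset_card_of_nodup hnd] at hcard
  simpa [Int.card_Ico] using hcard

theorem pvExistsRepeat (m b : Int) (hm : 0 < m) (hb0 : 0 ≤ b) (hbm : b < m) :
    ∃ k, pvOrbit m b k ∈ (List.range k).map (pvOrbit m b) := by
  by_contra h
  rw [not_exists] at h
  have hnd := pvNodupPrefix m b (m.toNat + 1) (fun i _ => h i) (m.toNat + 1) le_rfl
  have := pvKLe m b hm hb0 hbm (m.toNat + 1) hnd
  omega

theorem pvInnerA_run (m b : Int) (hm : 0 < m) (K : Nat)
    (hPK : pvOrbit m b K ∈ (List.range K).map (pvOrbit m b))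
    (hmin : ∀ i, i < K → pvOrbit m b i ∉ (List.range i).map (pvOrbit m b)) :
    ∀ fuel j, 1 ≤ j → j ≤ K → K ≤ j - 1 + fuel →
      pvInnerA m b fuel ((List.range j).map (pvOrbit m b)) (pvOrbit m b (j - 1)) (j : Int) = (K : Int) := by
  intro fuel
  induction fuel with
  | zero => intro j h1 h2 h3; omega
  | succ fuel ih =>
    intro j h1 h2 h3
    have he : PySem.Int.mod (pvOrbit m b (j - 1) * b) m = pvOrbit m b j := by
      rw [PySem.Int.mod_eq_emod_of_pos hm]
      conv_rhs => rw [show j = (j - 1) + 1 by omega]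
      rfl
    simp only [pvInnerA, he]
    by_cases hmem : pvOrbit m b j ∈ (List.range j).map (pvOrbit m b)
    · have hjK : j = K := by
        by_contra hne
        exact hmin j (by omega) hmem
      rw [if_neg (not_not_intro hmem), hjK]
    · have hjK : j < K := by
        rcases Nat.lt_or_ge j K with h | h
        · exact h
        · have hje : j = K := by omega
          subst hje
          exact absurd hPK hmem
      rw [if_pos hmem]
      have hstep : ((List.range j).map (pvOrbit m b)) ++ [pvOrbit m b j]
          = (List.range (j + 1)).map (pvOrbit m b) := by
        rw [List.range_succ, List.map_append]; rfl
      rw [hstep]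
      have hj1 : pvOrbit m b j = pvOrbit m b ((j + 1) - 1) := by norm_num
      rw [hj1, show ((j : Int) + 1) = ((j + 1 : Nat) : Int) by push_cast; ring]
      exact ih (j + 1) (by omega) (by omega) (by omega)

theorem pvOrbitClosure (m b : Int) (K : Nat)
    (hPK : pvOrbit m b K ∈ (List.range K).map (pvOrbit m b)) :
    ∀ j, pvOrbit m b j ∈ (List.range K).map (pvOrbit m b) := by
  intro j
  rcases Nat.lt_or_ge j K with h | h
  · exact List.mem_map.mpr ⟨j, List.mem_range.mpr h, rfl⟩
  · obtain ⟨d, rfl⟩ : ∃ d, j = K + d := ⟨j - K, by omega⟩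
    clear h
    induction d with
    | zero => simpa using hPK
    | succ d ihd =>
      obtain ⟨i, hi, hoi⟩ := List.mem_map.mp ihd
      rw [List.mem_range] at hi
      have hcur : pvOrbit m b (K + (d + 1)) = pvOrbit m b (i + 1) := by
        show (pvOrbit m b (K + d) * b).emod m = (pvOrbit m b i * b).emod m
        rw [hoi]
      rw [hcur]
      rcases Nat.lt_or_ge (i + 1) K with h2 | h2
      · exact List.mem_map.mpr ⟨i + 1, List.mem_range.mpr h2, rfl⟩
      · have : i + 1 = K := by omega
        rw [this]
        exact hPK

theorem pvFoldlIgnore {α β : Type} (f : β → β) (l : List α) (st : β) :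
    l.foldl (fun s _ => f s) st = f^[l.length] st := by
  induction l generalizing st with
  | nil => rfl
  | cons x xs ih => simp [List.foldl_cons, ih, Function.iterate_succ_apply]

theorem pvIterState (m b : Int) (hm : 0 < m) (hb0 : 0 ≤ b) (hbm : b < m) :
    ∀ t, 1 ≤ t →
      (fun (st : Int × PySem.Set Int) =>
        (PySem.Int.mod (st.1 * b) m, PySem.Set.add st.2 (PySem.Int.mod (st.1 * b) m)))^[t]
        (1, (PySem.Set.empty : PySem.Set Int))
      = (pvOrbit m b (t - 1), PySem.Set.ofList ((List.range t).map (pvOrbit m b))) := by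
  intro t ht
  induction t with
  | zero => omega
  | succ t ih =>
    rcases Nat.eq_zero_or_pos t with rfl | htpos
    · rw [Function.iterate_one]
      have hb : PySem.Int.mod (1 * b) m = b := by
        rw [PySem.Int.mod_eq_emod_of_pos hm, one_mul, Int.emod_eq_of_lt hb0 hbm]
      have h1 : (List.range 1).map (pvOrbit m b) = [b] := by simp [pvOrbit]
      rw [h1]
      show (PySem.Int.mod (1 * b) m, PySem.Set.add PySem.Set.empty (PySem.Int.mod (1 * b) m))
        = (b, PySem.Set.ofList [b])
      rw [hb]
      rfl
    · rw [Function.iterate_succ_apply', ih htpos]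
      have he : PySem.Int.mod (pvOrbit m b (t - 1) * b) m = pvOrbit m b t := by
        rw [PySem.Int.mod_eq_emod_of_pos hm]
        conv_rhs => rw [show t = (t - 1) + 1 by omega]
        rfl
      simp only [he]
      have hset : PySem.Set.add (PySem.Set.ofList ((List.range t).map (pvOrbit m b))) (pvOrbit m b t)
          = PySem.Set.ofList ((List.range (t + 1)).map (pvOrbit m b)) := by
        rw [List.range_succ, List.map_append, List.map_singleton, PySem.Set.ofList_append_singleton]
      rw [hset]
      norm_num

theorem pvSetLen (m b : Int) (K : Nat)
    (hPK : pvOrbit m b K ∈ (List.range K).map (pvOrbit m b))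
    (hmin : ∀ i, i < K → pvOrbit m b i ∉ (List.range i).map (pvOrbit m b))
    (hKle : K ≤ m.toNat) :
    (PySem.Set.ofList ((List.range m.toNat).map (pvOrbit m b))).length = K := by
  have hnd : ((List.range K).map (pvOrbit m b)).Nodup := pvNodupPrefix m b K hmin K le_rfl
  have hperm : (PySem.Set.ofList ((List.range m.toNat).map (pvOrbit m b))).Perm
      ((List.range K).map (pvOrbit m b)) := by
    rw [List.perm_ext_iff_of_nodup (PySem.Set.nodup_ofList _) hnd]
    intro x
    rw [PySem.Set.mem_ofList]
    constructor
    · intro hx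
      obtain ⟨j, _, rfl⟩ := List.mem_map.mp hx
      exact pvOrbitClosure m b K hPK j
    · intro hx
      obtain ⟨i, hi, rfl⟩ := List.mem_map.mp hx
      rw [List.mem_range] at hi
      exact List.mem_map.mpr ⟨i, List.mem_range.mpr (by omega), rfl⟩
  simpa using hperm.length_eq

theorem pvInner_eq (m b : Int) (hm : 0 < m) (hb0 : 0 ≤ b) (hbm : b < m) :
    pvInnerA m b m.toNat [b] b 1 =
      ((((PySem.List.pyRange 0 m 1).foldl
        (fun (st : Int × PySem.Set Int) _ =>
          let x := PySem.Int.mod (st.1 * b) m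
          (x, PySem.Set.add st.2 x)) (1, (PySem.Set.empty : PySem.Set Int))).2.length : Int)) := by
  classical
  have hex : ∃ k, pvOrbit m b k ∈ (List.range k).map (pvOrbit m b) :=
    pvExistsRepeat m b hm hb0 hbm
  have hPK := Nat.find_spec hex
  have hmin : ∀ i, i < Nat.find hex → pvOrbit m b i ∉ (List.range i).map (pvOrbit m b) :=
    fun i hi => Nat.find_min hex hi
  have hK1 : 1 ≤ Nat.find hex := by
    rcases Nat.eq_zero_or_pos (Nat.find hex) with h0 | h
    · rw [h0] at hPK; simp only [List.range_zero, List.map_nil] at hPK; exact absurd hPK (List.not_mem_nil)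
    · exact h
  have hKle : Nat.find hex ≤ m.toNat :=
    pvKLe m b hm hb0 hbm _ (pvNodupPrefix m b _ hmin _ le_rfl)
  have hA : pvInnerA m b m.toNat [b] b 1 = ((Nat.find hex : Nat) : Int) := by
    have h0 : (List.range 1).map (pvOrbit m b) = [b] := by
      simp [pvOrbit]
    have := pvInnerA_run m b hm (Nat.find hex) hPK hmin m.toNat 1 le_rfl hK1 (by omega)
    rw [h0] at this
    simpa [pvOrbit] using this
  have hlen : (PySem.List.pyRange 0 m 1).length = m.toNat := by
    have := PySem.List.length_pyRange_one 0 m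
    simpa using this
  rw [hA, pvFoldlIgnore, hlen, pvIterState m b hm hb0 hbm m.toNat (by omega),
    pvSetLen m b _ hPK hmin hKle]

theorem pvLoop_eq (n right : Int) :
    ∀ fuel fv, 1 ≤ fv → pvLoopA n right fuel fv = pvLoopB n right fuel fv := by
  intro fuel
  induction fuel with
  | zero => intro fv _; rfl
  | succ fuel ih =>
    intro fv hfv
    simp only [pvLoopA, pvLoopB]
    by_cases hc : pyGcd fv n ≠ 1 ∧ PySem.Int.mod fv n ≠ 0
    · rw [if_pos hc, if_pos hc]
    · rw [if_neg hc, if_neg hc]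
      have hb0 : 0 ≤ PySem.Int.mod n fv := PySem.Int.mod_nonneg (a := n) (b := fv) (by omega)
      have hbm : PySem.Int.mod n fv < fv := PySem.Int.mod_lt (a := n) (b := fv) (by omega)
      rw [pvInner_eq fv (PySem.Int.mod n fv) (by omega) hb0 hbm]
      rw [ih (fv + 1) (by omega)]

-- ===== VERDICT (by name: the statement is the Claim_ definition above) =====
theorem find_r_spec : Claim_equal_find_r := by
  intro n n_log _ _
  unfold Spec_find_r find_r find_r_alt
  exact pvLoop_eq n (n_log ^ 2) (2 ^ 63) 2 (by omega)
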